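-- pv_equiv track=rewrite | github.com/weilongzheng/PFC_MD_Modeling | tmp/utils.py | get_task_pair_id
-- ===== SOURCE A (Python) =====
-- import itertools
--
-- def get_task_pair_id(task_pair):
--     task_pair = tuple(task_pair)
--     tasks = ['yang19.dms-v0',
--              'yang19.dnms-v0',
--              'yang19.dmc-v0',
--              'yang19.dnmc-v0',
--              'yang19.dm1-v0',
--              'yang19.dm2-v0',
--              'yang19.ctxdm1-v0',
--              'yang19.ctxdm2-v0',
--              'yang19.multidm-v0',
--              'yang19.dlygo-v0',
--              'yang19.dlyanti-v0',
--              'yang19.go-v0',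
--              'yang19.anti-v0',
--              'yang19.rtgo-v0',
--              'yang19.rtanti-v0']
--     num_tasks = 2
--     task_pairs = list(itertools.permutations(tasks, num_tasks))
--     task_pairs = [val for val in task_pairs for i in range(2)]
--     for task_pair_id in range(len(task_pairs)):
--         if task_pairs[task_pair_id] == task_pair:
--             return task_pair_id
-- ===== SOURCE B (Python) =====
-- TASKS = ['yang19.dms-v0',
--          'yang19.dnms-v0',
--          'yang19.dmc-v0',
--          'yang19.dnmc-v0',
--          'yang19.dm1-v0',
--          'yang19.dm2-v0',
--          'yang19.ctxdm1-v0',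
--          'yang19.ctxdm2-v0',
--          'yang19.multidm-v0',
--          'yang19.dlygo-v0',
--          'yang19.dlyanti-v0',
--          'yang19.go-v0',
--          'yang19.anti-v0',
--          'yang19.rtgo-v0',
--          'yang19.rtanti-v0']
--
-- def get_task_pair_id(task_pair):
--     task_pair = tuple(task_pair)
--     if len(task_pair) != 2:
--         return None
--     try:
--         i = TASKS.index(task_pair[0])
--         j = TASKS.index(task_pair[1])
--     except ValueError:
--         return None
--     if i == j:
--         return None
--     return 2 * (i * 14 + (j if j < i else j - 1))
-- ===== Notes on version B (the rewrite author's own statement) =====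
-- stated objective: simpler
-- what changed: B replaces building the 420-element duplicated permutation list and linearly scanning it by two list.index lookups and a closed-form arithmetic computation of the permutation's lexicographic rank (2*(i*14 + (j if j<i else j-1))).
import Mathlib
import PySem

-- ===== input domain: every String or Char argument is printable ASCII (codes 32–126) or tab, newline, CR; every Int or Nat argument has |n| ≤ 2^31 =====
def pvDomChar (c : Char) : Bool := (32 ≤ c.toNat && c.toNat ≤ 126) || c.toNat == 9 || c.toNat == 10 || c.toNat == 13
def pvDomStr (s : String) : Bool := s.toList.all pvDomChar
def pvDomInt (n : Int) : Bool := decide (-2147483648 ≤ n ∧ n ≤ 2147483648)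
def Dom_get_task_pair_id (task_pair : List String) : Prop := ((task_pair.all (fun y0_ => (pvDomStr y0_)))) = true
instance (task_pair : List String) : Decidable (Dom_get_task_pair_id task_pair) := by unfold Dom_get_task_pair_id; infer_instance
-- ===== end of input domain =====

-- B computes the permutation id arithmetically from the two tasks' indices instead of building and scanning the 420-item duplicated permutation list (objective: simpler).
set_option maxRecDepth 20000


-- ===== PORT A =====
-- the fixed task list (shared data constant of both Pythons)
def pvTasks : List String :=
  ["yang19.dms-v0", "yang19.dnms-v0", "yang19.dmc-v0", "yang19.dnmc-v0",
   "yang19.dm1-v0", "yang19.dm2-v0", "yang19.ctxdm1-v0", "yang19.ctxdm2-v0",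
   "yang19.multidm-v0", "yang19.dlygo-v0", "yang19.dlyanti-v0", "yang19.go-v0",
   "yang19.anti-v0", "yang19.rtgo-v0", "yang19.rtanti-v0"]

-- itertools.permutations(tasks, 2): since the concrete list has distinct entries,
-- index-based selection equals value-based filtering (exact for this constant list)
def pvPerms : List (String × String) :=
  pvTasks.flatMap (fun a => (pvTasks.filter (fun b => b ≠ a)).map (fun b => (a, b)))

-- [val for val in task_pairs for i in range(2)]
def pvPermsDup : List (String × String) := pvPerms.flatMap (fun v => [v, v])

-- the indexed for-loop with its early return
def pvScan : List (String × String) → List String → Int → Option Int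
  | [], _, _ => none
  | p :: rest, tp, k => if tp = [p.1, p.2] then some k else pvScan rest tp (k + 1)

def get_task_pair_id (task_pair : List String) : Option Int :=
  pvScan pvPermsDup task_pair 0

-- ===== PORT B =====
def get_task_pair_id_alt (task_pair : List String) : Option Int :=
  match task_pair with
  | [x, y] =>
    match PySem.List.index? pvTasks x, PySem.List.index? pvTasks y with
    | some i, some j =>
        if i = j then none
        else some (2 * ((i : Int) * 14 + (if j < i then (j : Int) else (j : Int) - 1)))
    | _, _ => none
  | _ => none

-- ===== PRECONDITION & SPEC =====
def Spec_get_task_pair_id (task_pair : List String) (out : Option Int) : Prop := out = get_task_pair_id_alt task_pair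
instance (task_pair : List String) (out : Option Int) : Decidable (Spec_get_task_pair_id task_pair out) := by unfold Spec_get_task_pair_id; infer_instance

-- ===== CLAIM (what is proved, stated in full; the proofs are below) =====
def Claim_equal_get_task_pair_id : Prop := ∀ (task_pair : List String), Dom_get_task_pair_id task_pair → Spec_get_task_pair_id task_pair (get_task_pair_id task_pair)

-- ===== LEMMAS AND PROOFS =====

-- if the input does not have length 2, no candidate pair can match
theorem pvScan_none_of_len (ps : List (String × String)) (tp : List String) (k : Int)
    (h : tp.length ≠ 2) : pvScan ps tp k = none := by
  induction ps generalizing k with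
  | nil => rfl
  | cons p rest ih =>
      simp only [pvScan]
      rw [if_neg, ih]
      intro he; apply h; rw [he]; rfl

-- if x (resp. y) is not a task, no candidate matches [x, y]
theorem pvScan_none_of_not_mem (ps : List (String × String)) (x y : String) (k : Int)
    (hps : ∀ p ∈ ps, p.1 ∈ pvTasks ∧ p.2 ∈ pvTasks)
    (h : x ∉ pvTasks ∨ y ∉ pvTasks) : pvScan ps [x, y] k = none := by
  induction ps generalizing k with
  | nil => rfl
  | cons p rest ih =>
      simp only [pvScan]
      rw [if_neg, ih]
      · intro q hq; exact hps q (List.mem_cons_of_mem _ hq)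
      · intro he
        have h1 := (hps p (List.mem_cons_self ..)).1
        have h2 := (hps p (List.mem_cons_self ..)).2
        cases h with
        | inl hx => exact hx (by injection he with e1 _; rw [e1]; exact h1)
        | inr hy =>
            apply hy
            injection he with _ e2; injection e2 with e2 _; rw [e2]; exact h2

theorem pvPermsDup_mem : ∀ p ∈ pvPermsDup, p.1 ∈ pvTasks ∧ p.2 ∈ pvTasks := by decide

-- ===== VERDICT =====
theorem get_task_pair_id_spec : Claim_equal_get_task_pair_id := by
  intro task_pair _
  unfold Spec_get_task_pair_id
  match task_pair with
  | [] =>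
      show get_task_pair_id _ = _
      unfold get_task_pair_id
      rw [pvScan_none_of_len _ _ _ (by simp)]; rfl
  | [_] =>
      show get_task_pair_id _ = _
      unfold get_task_pair_id
      rw [pvScan_none_of_len _ _ _ (by simp)]; rfl
  | _ :: _ :: _ :: _ =>
      show get_task_pair_id _ = _
      unfold get_task_pair_id
      rw [pvScan_none_of_len _ _ _ (by simp)]; rfl
  | [x, y] =>
      by_cases hx : x ∈ pvTasks
      · by_cases hy : y ∈ pvTasks
        · fin_cases hx <;> fin_cases hy <;> decide
        · show get_task_pair_id _ = _
          unfold get_task_pair_id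
          rw [pvScan_none_of_not_mem _ _ _ _ pvPermsDup_mem (Or.inr hy)]
          simp only [get_task_pair_id_alt]
          rw [(PySem.List.index?_eq_none_iff pvTasks y).mpr hy]
          cases PySem.List.index? pvTasks x <;> rfl
      · show get_task_pair_id _ = _
        unfold get_task_pair_id
        rw [pvScan_none_of_not_mem _ _ _ _ pvPermsDup_mem (Or.inl hx)]
        simp only [get_task_pair_id_alt]
        rw [(PySem.List.index?_eq_none_iff pvTasks x).mpr hx]
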